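-- pv_equiv track=rewrite | github.com/flexcompute/tidy3d | tidy3d/web/cli/converter.py | _is_declaration
-- ===== SOURCE A (Python) =====
-- def _is_declaration(Line: str) -> bool:
--     comment = False
--     for i in range(0, len(Line)):
--         if Line[i] == "#":
--             comment = True
--         if Line[i] == "=" and not comment:
--             if "[" in Line[i] and "]" in Line[i]:  # change array syntax
--                 l_bracket = Line[i].find("[")
--                 new_array_string = "["
--                 array = Line[l_bracket + 1 :].split(";")
--                 for a in array:
--                     new_array_string += "(" + a + "),"
--                 r_bracket = new_array_string.find("]")
--                 new_array_string = (
--                     new_array_string[:r_bracket] + ")" + new_array_string[r_bracket:-1]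
--                 )
--                 Line[i] = Line[i][:l_bracket] + new_array_string
--             return True
--     return False
-- ===== SOURCE B (Python) =====
-- def _is_declaration(Line: str) -> bool:
--     # Cut off the comment part first, then test membership in what remains.
--     return "=" in Line.split("#")[0]
-- ===== Notes on version B (the rewrite author's own statement) =====
-- stated objective: faster
-- what changed: Replaces the index loop with a mutable comment flag (and its unreachable bracket-rewriting block) by two staged passes: split the line at '#' to discard the comment, then a plain membership test for '=' in the remaining head.
import Mathlib
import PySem

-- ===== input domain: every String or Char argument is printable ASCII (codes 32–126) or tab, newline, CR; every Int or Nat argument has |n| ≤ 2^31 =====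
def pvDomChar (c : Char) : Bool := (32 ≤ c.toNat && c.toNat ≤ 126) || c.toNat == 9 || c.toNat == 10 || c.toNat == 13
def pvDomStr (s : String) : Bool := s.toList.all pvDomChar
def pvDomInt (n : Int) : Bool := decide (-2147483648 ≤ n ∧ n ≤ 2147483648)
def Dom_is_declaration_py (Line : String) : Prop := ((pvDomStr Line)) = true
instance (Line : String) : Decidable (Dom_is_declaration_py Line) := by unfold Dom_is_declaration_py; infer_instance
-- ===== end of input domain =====

-- B replaces A's single char loop carrying a comment flag (whose bracket-rewriting block is
-- unreachable: its guard tests "[" in the one-character string "=") by two staged passes: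
-- split the line at '#' to discard the comment, then a membership test; objective: faster (a timing run measured B faster).

-- ===== PORT A =====
-- the loop 'for i in range(0, len(Line))' reading Line[i], as structural recursion over the
-- character list with the same 'comment' flag
def isDeclLoop : List Char → Bool → Bool
  | [], _ => false
  | c :: rest, comment =>
    let comment := if c = '#' then true else comment
    if c = '=' ∧ comment = false then
      if PySem.Str.isIn "[" (String.singleton c) && PySem.Str.isIn "]" (String.singleton c)
      then true
      else true
    else isDeclLoop rest comment

def is_declaration_py (Line : String) : Bool := isDeclLoop Line.toList false

-- ===== PORT B =====
def is_declaration_py_alt (Line : String) : Bool :=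
  -- Line.split("#") : the separator "#" is nonempty, so split? is always `some`,
  -- and the resulting list is never empty, so the [0] lookup is always `some`.
  let parts := (PySem.Str.split? Line "#").getD []
  PySem.Str.isIn "=" ((PySem.List.pyGet? parts 0).getD "")

-- ===== PRECONDITION & SPEC =====
def Spec_is_declaration_py (Line : String) (out : Bool) : Prop := out = is_declaration_py_alt Line
instance (Line : String) (out : Bool) : Decidable (Spec_is_declaration_py Line out) := by unfold Spec_is_declaration_py; infer_instance

-- ===== CLAIM (what is proved, stated in full; the proofs are below) =====
def Claim_equal_is_declaration_py : Prop := ∀ (Line : String), Dom_is_declaration_py Line → Spec_is_declaration_py Line (is_declaration_py Line)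

-- ===== LEMMAS AND PROOFS =====

-- once the comment flag is set, A's loop can only return False
theorem isDeclLoop_true (l : List Char) : isDeclLoop l true = false := by
  induction l with
  | nil => rfl
  | cons c rest ih => simp [isDeclLoop, ih]

-- A's loop decides membership of '=' in the prefix before the first '#'
theorem isDeclLoop_eq_takeWhile (l : List Char) :
    isDeclLoop l false = decide ('=' ∈ l.takeWhile (· ≠ '#')) := by
  induction l with
  | nil => rfl
  | cons c rest ih =>
    by_cases hh : c = '#'
    · subst hh
      simp [isDeclLoop, isDeclLoop_true]
    · by_cases he : c = '='
      · subst he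
        simp [isDeclLoop, hh]
      · have : isDeclLoop (c :: rest) false = isDeclLoop rest false := by
          simp [isDeclLoop, hh, he]
        rw [this, ih]
        simp [hh, eq_comm, he]

-- accumulator lemma for the split worker: the pieces collected so far come first
theorem splitOn_go_acc (sep : List Char) (fuel : Nat) (l cur : List Char)
    (acc : List (List Char)) :
    PySem.Chars.splitOn.go sep fuel l cur acc =
      acc.reverse ++ PySem.Chars.splitOn.go sep fuel l cur [] := by
  induction fuel generalizing l cur acc with
  | zero => simp [PySem.Chars.splitOn.go]
  | succ fuel ih =>
    cases l with
    | nil => simp [PySem.Chars.splitOn.go]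
    | cons c rest =>
      simp only [PySem.Chars.splitOn.go]
      split
      · rw [ih _ _ (cur.reverse :: acc), ih _ _ [cur.reverse]]
        simp
      · exact ih _ _ _

-- head of split at '#': the characters before the first '#'
theorem splitOn_go_head (fuel : Nat) (l cur : List Char) (h : l.length < fuel) :
    (PySem.Chars.splitOn.go ['#'] fuel l cur []).headD [] =
      cur.reverse ++ l.takeWhile (· ≠ '#') := by
  induction fuel generalizing l cur with
  | zero => omega
  | succ fuel ih =>
    cases l with
    | nil => simp [PySem.Chars.splitOn.go]
    | cons c rest =>
      simp only [PySem.Chars.splitOn.go]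
      split
      · rename_i hp
        have hc : c = '#' := by
          rcases List.isPrefixOf_iff_prefix.mp hp with ⟨t, ht⟩
          cases ht
          rfl
        rw [splitOn_go_acc _ _ _ _ [cur.reverse]]
        simp [hc]
      · rename_i hp
        have hc : c ≠ '#' := by
          intro hcc
          exact hp (by simp [hcc])
        rw [ih rest (c :: cur) (by simpa using Nat.lt_of_succ_lt_succ h)]
        simp [hc]

theorem singleton_infix_iff (a : Char) (l : List Char) : [a] <:+: l ↔ a ∈ l := by
  constructor
  · intro h
    exact h.mem (by simp)
  · intro h
    rcases List.mem_iff_append.mp h with ⟨s, t, rfl⟩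
    exact ⟨s, t, by simp⟩

-- ===== VERDICT (by name: the statement is the Claim_ definition above) =====
theorem is_declaration_py_spec : Claim_equal_is_declaration_py := by
  intro Line _
  unfold Spec_is_declaration_py is_declaration_py is_declaration_py_alt
  simp only [PySem.Str.split?, PySem.Chars.split?]
  rw [if_neg (by simp)]
  have hhead := splitOn_go_head (Line.toList.length + 1) Line.toList []
    (Nat.lt_succ_self _)
  simp only [PySem.Chars.splitOn, show "#".toList = ['#'] from rfl] at *
  rcases hgo : PySem.Chars.splitOn.go ['#'] (Line.toList.length + 1) Line.toList [] [] with
    _ | ⟨hd, tl⟩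
  · -- impossible shape (the split result is never empty), but both sides are false there anyway
    rw [hgo] at hhead
    have htw : List.takeWhile (fun x => decide (x ≠ '#')) Line.toList = [] := by
      simpa using hhead.symm
    rw [isDeclLoop_eq_takeWhile, htw]
    decide
  · rw [hgo] at hhead
    simp only [List.headD_cons, List.reverse_nil, List.nil_append] at hhead
    simp only [Option.map_some, Option.getD_some, List.map_cons, PySem.List.pyGet?_zero_cons]
    rw [isDeclLoop_eq_takeWhile, ← hhead]
    rw [show PySem.Str.isIn "=" (String.ofList hd) =
          PySem.Chars.isIn ['='] hd by simp [PySem.Str.isIn]]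
    by_cases hm : '=' ∈ hd
    · rw [show PySem.Chars.isIn ['='] hd = true from
        (PySem.Chars.isIn_iff_infix _ _).mpr ((singleton_infix_iff _ _).mpr hm)]
      simp [hm]
    · rw [show PySem.Chars.isIn ['='] hd = false from Bool.eq_false_iff.mpr
        (fun h => hm ((singleton_infix_iff _ _).mp ((PySem.Chars.isIn_iff_infix _ _).mp h)))]
      simp [hm]
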